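-- pv_equiv track=rewrite | github.com/enricotomasi/GeeksforGeeks_problems | Medium/Sum of Products.py | pairAndSum
-- ===== SOURCE A (Python) =====
-- def pairAndSum(n, arr):
--     #code here
--     ans = 0
--
--     for i in range(32):
--         temp = 0
--
--         for j in arr:
--             if (1 << i) & j != 0:
--                 temp += 1
--
--         ans += 2 ** i * temp * (temp - 1) // 2
--
--     return ans
-- ===== SOURCE B (Python) =====
-- def pairAndSum(n, arr):
--     # Brute force over all unordered pairs; the problem (and A) is stated over
--     # bit positions 0..31, so each pair's AND is reduced to those 32 bits.
--     MASK = 0xFFFFFFFF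
--     ans = 0
--     for i, x in enumerate(arr):
--         for y in arr[i + 1:]:
--             ans += x & y & MASK
--     return ans
-- ===== Notes on version B (the rewrite author's own statement) =====
-- stated objective: alternative
-- what changed: Replaces A's per-bit counting (32 passes counting set bits and summing 2^i*C(temp,2)) with a direct sum of the 32-bit AND over all unordered pairs.
import Mathlib
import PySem

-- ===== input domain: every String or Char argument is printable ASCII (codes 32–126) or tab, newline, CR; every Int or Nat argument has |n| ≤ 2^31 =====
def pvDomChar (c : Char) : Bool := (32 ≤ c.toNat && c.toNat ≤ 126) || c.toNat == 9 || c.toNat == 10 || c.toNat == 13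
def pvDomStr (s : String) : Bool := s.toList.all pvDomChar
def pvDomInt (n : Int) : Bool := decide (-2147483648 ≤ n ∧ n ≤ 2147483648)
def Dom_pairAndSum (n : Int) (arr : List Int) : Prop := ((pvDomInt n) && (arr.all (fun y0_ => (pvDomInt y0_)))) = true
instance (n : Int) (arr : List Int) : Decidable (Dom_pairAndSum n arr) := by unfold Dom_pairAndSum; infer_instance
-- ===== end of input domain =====

-- B replaces A's 32-pass per-bit counting with a direct sum of the 32-bit AND over all
-- unordered pairs: a different algorithm of different shape (O(n^2) vs A's O(32 n)),
-- returning the same value on every input.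

-- ===== PORT A =====
-- 'for i in range(32)' yields only nonnegative i, so '1 << i' and '2 ** i' are ported
-- with the exact exponent i.toNat.
def pairAndSum (n : Int) (arr : List Int) : Int :=
  (PySem.List.pyRange 0 32 1).foldl (fun ans i =>
    let temp : Int :=
      arr.foldl (fun t j => if PySem.Int.band ((1:Int) <<< i.toNat) j ≠ 0 then t + 1 else t) 0
    ans + PySem.Int.floordiv (2 ^ i.toNat * temp * (temp - 1)) 2) 0

-- ===== PORT B =====
-- one step of B's outer loop: x is arr[i], rest is arr[i+1:]; the inner fold is
-- 'for y in arr[i+1:]: ans += x & y & MASK' with MASK = 0xFFFFFFFF = 4294967295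
def altPairs : List Int → Int
  | [] => 0
  | x :: rest =>
      rest.foldl (fun s y => s + PySem.Int.band (PySem.Int.band x y) 4294967295) 0
        + altPairs rest

def pairAndSum_alt (n : Int) (arr : List Int) : Int := altPairs arr

-- ===== PRECONDITION & SPEC =====
def Spec_pairAndSum (n : Int) (arr : List Int) (out : Int) : Prop := out = pairAndSum_alt n arr
instance (n : Int) (arr : List Int) (out : Int) : Decidable (Spec_pairAndSum n arr out) := by unfold Spec_pairAndSum; infer_instance

-- ===== CLAIM (what is proved, stated in full; the proofs are below) =====
def Claim_equal_pairAndSum : Prop := ∀ (n : Int) (arr : List Int), Dom_pairAndSum n arr → Spec_pairAndSum n arr (pairAndSum n arr)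

-- ===== LEMMAS AND PROOFS =====

-- 'bit k is set in z', as A tests it (abbrev so Decidable instances unfold it)
abbrev bitP (k : Nat) (z : Int) : Prop := PySem.Int.band ((2:Int) ^ k) z ≠ 0

-- the count A's inner loop accumulates for bit position k
def cnt (k : Nat) (arr : List Int) : Int := (arr.countP (fun j => decide (bitP k j)) : Nat)

theorem nat_bitsum (K m : Nat) :
    (∑ k ∈ Finset.range K, 2 ^ k * (m.testBit k).toNat) = m % 2 ^ K := by
  induction K with
  | zero => simp [Nat.mod_one]
  | succ K ih =>
    rw [Finset.sum_range_succ, ih, pow_succ, Nat.mod_mul, Nat.testBit_eq_decide_div_mod_eq]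
    rcases Nat.mod_two_eq_zero_or_one (m / 2 ^ K) with h | h <;> simp [h]

theorem int_geom (K : Nat) : (∑ k ∈ Finset.range K, (2:Int) ^ k) = 2 ^ K - 1 := by
  induction K with
  | zero => simp
  | succ K ih => rw [Finset.sum_range_succ, ih, pow_succ]; ring

theorem nat_ldiff_eq_sub (m n : Nat) : Nat.ldiff m n = m - (m &&& n) := by
  have h1 : (m &&& n) + Nat.ldiff m n = m := by
    have hm : m < 2 ^ (m + n) :=
      lt_of_lt_of_le Nat.lt_two_pow_self (Nat.pow_le_pow_right (by omega) (by omega))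
    have hn : n < 2 ^ (m + n) :=
      lt_of_lt_of_le Nat.lt_two_pow_self (Nat.pow_le_pow_right (by omega) (by omega))
    have hand : (m &&& n) < 2 ^ (m + n) := lt_of_le_of_lt Nat.and_le_left hm
    have hld : Nat.ldiff m n < 2 ^ (m + n) := by
      unfold Nat.ldiff; exact Nat.bitwise_lt_two_pow hm hn
    have e1 := nat_bitsum (m + n) (m &&& n)
    have e2 := nat_bitsum (m + n) (Nat.ldiff m n)
    have e3 := nat_bitsum (m + n) m
    rw [Nat.mod_eq_of_lt hand] at e1
    rw [Nat.mod_eq_of_lt hld] at e2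
    rw [Nat.mod_eq_of_lt hm] at e3
    calc (m &&& n) + Nat.ldiff m n
        = (∑ k ∈ Finset.range (m + n), 2 ^ k * ((m &&& n).testBit k).toNat)
          + (∑ k ∈ Finset.range (m + n), 2 ^ k * ((Nat.ldiff m n).testBit k).toNat) := by
          rw [e1, e2]
      _ = ∑ k ∈ Finset.range (m + n), 2 ^ k * (m.testBit k).toNat := by
          rw [← Finset.sum_add_distrib]
          apply Finset.sum_congr rfl
          intro k _
          rw [Nat.testBit_land, Nat.testBit_ldiff]
          cases hmk : m.testBit k <;> cases hnk : n.testBit k <;> simp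
      _ = m := e3
  omega

theorem bitP_iff_testBit (k : Nat) (z : Int) : bitP k z ↔ z.testBit k = true := by
  unfold bitP
  have hpow : ((2:Int) ^ k).toNat = 2 ^ k := by
    rw [show ((2:Int) ^ k) = ((2 ^ k : Nat) : Int) by push_cast; ring, Int.toNat_natCast]
  have hpos : (0:Int) ≤ (2:Int) ^ k := by positivity
  cases z with
  | ofNat m =>
    simp only [PySem.Int.band, hpos, if_pos, Int.ofNat_eq_natCast]
    rw [if_pos (by exact_mod_cast Nat.zero_le m), hpow]
    rw [show ((m:Int)).toNat = m from Int.toNat_natCast m, Nat.two_pow_and]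
    simp only [Int.testBit]
    cases h : m.testBit k <;> simp [h]
  | negSucc m =>
    simp only [PySem.Int.band, hpos, if_pos]
    rw [if_neg (by exact Int.not_le.mpr (Int.negSucc_lt_zero m)), hpow]
    have h1 : (-Int.negSucc m - 1).toNat = m := by rw [Int.neg_negSucc]; simp
    rw [h1, Nat.two_pow_and]
    simp only [Int.testBit]
    cases h : m.testBit k <;> simp [h]

theorem band_testBit (a b : Int) (k : Nat) :
    (PySem.Int.band a b).testBit k = (a.testBit k && b.testBit k) := by
  cases a with
  | ofNat m =>
    cases b with
    | ofNat n =>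
      simp only [PySem.Int.band, Int.ofNat_eq_natCast]
      rw [if_pos (by exact_mod_cast Nat.zero_le m), if_pos (by exact_mod_cast Nat.zero_le n)]
      simp [Int.testBit]
    | negSucc n =>
      simp only [PySem.Int.band, Int.ofNat_eq_natCast]
      rw [if_pos (by exact_mod_cast Nat.zero_le m),
        if_neg (by exact Int.not_le.mpr (Int.negSucc_lt_zero n))]
      have h1 : (-Int.negSucc n - 1).toNat = n := by rw [Int.neg_negSucc]; simp
      rw [h1, show ((m:Int)).toNat = m from Int.toNat_natCast m, ← nat_ldiff_eq_sub]
      simp [Int.testBit, Nat.testBit_ldiff]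
  | negSucc m =>
    cases b with
    | ofNat n =>
      simp only [PySem.Int.band, Int.ofNat_eq_natCast]
      rw [if_neg (by exact Int.not_le.mpr (Int.negSucc_lt_zero m)),
        if_pos (by exact_mod_cast Nat.zero_le n)]
      have h1 : (-Int.negSucc m - 1).toNat = m := by rw [Int.neg_negSucc]; simp
      rw [h1, show ((n:Int)).toNat = n from Int.toNat_natCast n, ← nat_ldiff_eq_sub]
      simp [Int.testBit, Nat.testBit_ldiff, Bool.and_comm]
    | negSucc n =>
      simp only [PySem.Int.band]
      rw [if_neg (by exact Int.not_le.mpr (Int.negSucc_lt_zero m)),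
        if_neg (by exact Int.not_le.mpr (Int.negSucc_lt_zero n))]
      have h1 : (-Int.negSucc m - 1).toNat = m := by rw [Int.neg_negSucc]; simp
      have h2 : (-Int.negSucc n - 1).toNat = n := by rw [Int.neg_negSucc]; simp
      rw [h1, h2, show -((m ||| n : Nat) : Int) - 1 = Int.negSucc (m ||| n) by
        rw [Int.negSucc_eq]; ring]
      simp [Int.testBit]

theorem nat_and_mask (m : Nat) : m &&& (2 ^ 32 - 1) = m % 2 ^ 32 := by
  apply Nat.eq_of_testBit_eq
  intro k
  rw [Nat.testBit_land, Nat.testBit_two_pow_sub_one, Nat.testBit_mod_two_pow, Bool.and_comm]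

theorem if_toNat (b : Bool) : (if b = true then (1:Int) else 0) = ((b.toNat : Nat) : Int) := by
  cases b <;> simp

theorem maskSum (w : Int) :
    (∑ k ∈ Finset.range 32, (2:Int) ^ k * (if w.testBit k then 1 else 0)) =
      PySem.Int.band w 4294967295 := by
  have hmask : ((4294967295:Int)).toNat = 2 ^ 32 - 1 := by
    rw [show ((4294967295:Int)) = ((4294967295 : Nat) : Int) by norm_num, Int.toNat_natCast]
    norm_num
  cases w with
  | ofNat m =>
    have : ∀ k, (Int.ofNat m).testBit k = m.testBit k := fun k => rfl
    calc (∑ k ∈ Finset.range 32, (2:Int) ^ k * (if (Int.ofNat m).testBit k then 1 else 0))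
        = ((∑ k ∈ Finset.range 32, 2 ^ k * (m.testBit k).toNat : Nat) : Int) := by
          rw [Nat.cast_sum]
          apply Finset.sum_congr rfl
          intro k _
          rw [this, if_toNat]
          push_cast
          ring
      _ = ((m % 2 ^ 32 : Nat) : Int) := by rw [nat_bitsum]
      _ = PySem.Int.band (Int.ofNat m) 4294967295 := by
          simp only [PySem.Int.band, Int.ofNat_eq_natCast]
          rw [if_pos (by exact_mod_cast Nat.zero_le m), if_pos (by norm_num)]
          rw [show ((m:Int)).toNat = m from Int.toNat_natCast m, hmask, nat_and_mask]
  | negSucc m =>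
    have hbit : ∀ k, (Int.negSucc m).testBit k = !(m.testBit k) := fun k => rfl
    have hle : m % 2 ^ 32 < 2 ^ 32 := Nat.mod_lt _ (by norm_num)
    calc (∑ k ∈ Finset.range 32, (2:Int) ^ k * (if (Int.negSucc m).testBit k then 1 else 0))
        = ∑ k ∈ Finset.range 32,
            ((2:Int) ^ k - 2 ^ k * ((m.testBit k).toNat : Nat)) := by
          apply Finset.sum_congr rfl
          intro k _
          rw [hbit]
          cases h : m.testBit k <;> simp [h]
      _ = (2 ^ 32 - 1) - ((∑ k ∈ Finset.range 32, 2 ^ k * (m.testBit k).toNat : Nat) : Int) := by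
          rw [Finset.sum_sub_distrib, int_geom]
          push_cast; ring
      _ = (2 ^ 32 - 1) - ((m % 2 ^ 32 : Nat) : Int) := by rw [nat_bitsum]
      _ = PySem.Int.band (Int.negSucc m) 4294967295 := by
          simp only [PySem.Int.band]
          rw [if_neg (by exact Int.not_le.mpr (Int.negSucc_lt_zero m)), if_pos (by norm_num)]
          have h1 : (-Int.negSucc m - 1).toNat = m := by rw [Int.neg_negSucc]; simp
          rw [h1, hmask, Nat.and_comm, nat_and_mask]
          have h2 : m % 2 ^ 32 ≤ 2 ^ 32 - 1 := by omega
          rw [Nat.cast_sub h2]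
          push_cast
          norm_num

theorem pair_sum (x y : Int) :
    (∑ k ∈ Finset.range 32,
        (2:Int) ^ k * (if bitP k x then 1 else 0) * (if bitP k y then 1 else 0)) =
      PySem.Int.band (PySem.Int.band x y) 4294967295 := by
  rw [← maskSum]
  apply Finset.sum_congr rfl
  intro k _
  rw [band_testBit]
  by_cases hx : bitP k x <;> by_cases hy : bitP k y <;>
    [skip; skip; skip; skip] <;>
    first
    | (rw [if_pos hx, if_pos hy,
        (bitP_iff_testBit k x).mp hx, (bitP_iff_testBit k y).mp hy]; simp)
    | (rw [if_pos hx, if_neg hy]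
       have := (not_iff_not.mpr (bitP_iff_testBit k y)).mp hy
       simp [this, (bitP_iff_testBit k x).mp hx])
    | (rw [if_neg hx]
       have := (not_iff_not.mpr (bitP_iff_testBit k x)).mp hx
       simp [this])

theorem cnt_cons (k : Nat) (x : Int) (xs : List Int) :
    cnt k (x :: xs) = cnt k xs + (if bitP k x then 1 else 0) := by
  simp only [cnt, List.countP_cons]
  by_cases h : bitP k x <;> simp [h]

theorem term_step (k : Nat) (t b : Int) (hb : b = 0 ∨ b = 1) :
    PySem.Int.floordiv (2 ^ k * (t + b) * (t + b - 1)) 2 =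
      PySem.Int.floordiv (2 ^ k * t * (t - 1)) 2 + 2 ^ k * b * t := by
  have heven : ∀ s : Int, ∃ u : Int, s * (s - 1) = 2 * u := by
    intro s
    rcases Int.even_mul_succ_self (s - 1) with ⟨u, hu⟩
    exact ⟨u, by rw [show s * (s - 1) = (s - 1) * (s - 1 + 1) by ring, hu]; ring⟩
  have hdiv : ∀ m : Int, PySem.Int.floordiv (2 * m) 2 = m := by
    intro m
    rw [PySem.Int.floordiv_eq_ediv_of_pos (by norm_num)]
    omega
  rcases hb with h | h
  · rw [h]; ring_nf
  · rw [h]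
    rcases heven t with ⟨u, hu⟩
    have e1 : 2 ^ k * (t + 1) * (t + 1 - 1) = 2 * (2 ^ k * (u + t)) := by
      have : (t + 1) * t = t * (t - 1) + 2 * t := by ring
      calc 2 ^ k * (t + 1) * (t + 1 - 1) = 2 ^ k * ((t + 1) * t) := by ring
        _ = 2 ^ k * (2 * u + 2 * t) := by rw [this, hu]
        _ = 2 * (2 ^ k * (u + t)) := by ring
    have e2 : 2 ^ k * t * (t - 1) = 2 * (2 ^ k * u) := by
      calc 2 ^ k * t * (t - 1) = 2 ^ k * (t * (t - 1)) := by ring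
        _ = 2 * (2 ^ k * u) := by rw [hu]; ring
    rw [e1, e2, hdiv, hdiv]
    ring

theorem head_sum (x : Int) (xs : List Int) :
    (∑ k ∈ Finset.range 32, (2:Int) ^ k * (if bitP k x then 1 else 0) * cnt k xs) =
      (xs.map (fun y => PySem.Int.band (PySem.Int.band x y) 4294967295)).sum := by
  induction xs with
  | nil => simp [cnt]
  | cons y ys ih =>
    have : ∀ k, cnt k (y :: ys) = cnt k ys + (if bitP k y then (1:Int) else 0) := fun k =>
      cnt_cons k y ys
    calc (∑ k ∈ Finset.range 32, (2:Int) ^ k * (if bitP k x then 1 else 0) * cnt k (y :: ys))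
        = (∑ k ∈ Finset.range 32, ((2:Int) ^ k * (if bitP k x then 1 else 0) * cnt k ys
            + (2:Int) ^ k * (if bitP k x then 1 else 0) * (if bitP k y then 1 else 0))) := by
          apply Finset.sum_congr rfl
          intro k _
          rw [this k]; ring
      _ = (∑ k ∈ Finset.range 32, (2:Int) ^ k * (if bitP k x then 1 else 0) * cnt k ys)
          + (∑ k ∈ Finset.range 32,
              (2:Int) ^ k * (if bitP k x then 1 else 0) * (if bitP k y then 1 else 0)) :=
          Finset.sum_add_distrib
      _ = (ys.map (fun y => PySem.Int.band (PySem.Int.band x y) 4294967295)).sum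
          + PySem.Int.band (PySem.Int.band x y) 4294967295 := by rw [ih, pair_sum]
      _ = ((y :: ys).map (fun y => PySem.Int.band (PySem.Int.band x y) 4294967295)).sum := by
          rw [List.map_cons, List.sum_cons]; ring

theorem alt_inner (x : Int) (xs : List Int) :
    (xs.foldl (fun s y => s + PySem.Int.band (PySem.Int.band x y) 4294967295) 0) =
      (xs.map (fun y => PySem.Int.band (PySem.Int.band x y) 4294967295)).sum := by
  rw [PySem.List.foldl_add]
  ring

theorem main_sum (arr : List Int) :
    (∑ k ∈ Finset.range 32,
        PySem.Int.floordiv (2 ^ k * cnt k arr * (cnt k arr - 1)) 2) = altPairs arr := by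
  induction arr with
  | nil =>
    simp only [altPairs]
    apply Finset.sum_eq_zero
    intro k _
    simp [cnt, PySem.Int.floordiv]
  | cons x xs ih =>
    calc (∑ k ∈ Finset.range 32,
            PySem.Int.floordiv (2 ^ k * cnt k (x :: xs) * (cnt k (x :: xs) - 1)) 2)
        = (∑ k ∈ Finset.range 32,
            (PySem.Int.floordiv (2 ^ k * cnt k xs * (cnt k xs - 1)) 2
              + 2 ^ k * (if bitP k x then 1 else 0) * cnt k xs)) := by
          apply Finset.sum_congr rfl
          intro k _
          rw [cnt_cons]
          exact term_step k (cnt k xs) _ (by by_cases h : bitP k x <;> simp [h])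
      _ = (∑ k ∈ Finset.range 32, PySem.Int.floordiv (2 ^ k * cnt k xs * (cnt k xs - 1)) 2)
          + (∑ k ∈ Finset.range 32, 2 ^ k * (if bitP k x then 1 else 0) * cnt k xs) :=
          Finset.sum_add_distrib
      _ = altPairs xs + (xs.map (fun y => PySem.Int.band (PySem.Int.band x y) 4294967295)).sum := by
          rw [ih, head_sum]
      _ = altPairs (x :: xs) := by
          simp only [altPairs, alt_inner]; ring

theorem list_range_sum (n : Nat) (f : Nat → Int) :
    ((List.range n).map f).sum = ∑ i ∈ Finset.range n, f i := by
  induction n with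
  | zero => simp
  | succ m ih =>
    rw [List.range_succ, Finset.sum_range_succ, List.map_append, List.sum_append, ih]; simp

theorem inner_cnt (k : Nat) (arr : List Int) :
    (arr.foldl (fun t j => if PySem.Int.band ((1:Int) <<< ((k:Nat):Int)) j ≠ 0 then t + 1 else t) 0) =
      cnt k arr := by
  have h1 : (1:Int) <<< ((k:Nat):Int) = (2:Int) ^ k := by
    rw [Int.one_shiftLeft]; push_cast; ring
  have h2 : (fun (t : Int) j => if PySem.Int.band ((1:Int) <<< ((k:Nat):Int)) j ≠ 0 then t + 1 else t) =
      (fun (t : Int) j => if (fun j => decide (bitP k j)) j = true then t + 1 else t) := by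
    funext t j
    rw [h1]
    by_cases h : bitP k j
    · rw [if_pos (by simpa [bitP] using h), if_pos (by simpa using h)]
    · rw [if_neg (by simpa [bitP] using h), if_neg (by simpa using h)]
  rw [h2, PySem.List.foldl_count_if]
  simp [cnt]

theorem pairAndSum_eq_sum (n : Int) (arr : List Int) :
    pairAndSum n arr =
      ∑ k ∈ Finset.range 32,
        PySem.Int.floordiv (2 ^ k * cnt k arr * (cnt k arr - 1)) 2 := by
  unfold pairAndSum
  rw [PySem.List.pyRange_one, show ((32:Int) - 0).toNat = 32 by decide, List.foldl_map]
  simp only [zero_add, Int.toNat_natCast, inner_cnt]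
  rw [PySem.List.foldl_add, list_range_sum]
  ring

-- ===== VERDICT (by name: the statement is the Claim_ definition above) =====
theorem pairAndSum_spec : Claim_equal_pairAndSum := by
  intro n arr _
  unfold Spec_pairAndSum pairAndSum_alt
  rw [pairAndSum_eq_sum, main_sum]
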